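-- pv_equiv track=rewrite | github.com/sharulvsk/Stripe | penaulty-c.py | compute
-- ===== SOURCE A (Python) =====
-- def compute(a: str) -> int:
--     p = sum(1 for ch in a if ch == 'Y')
--     min_p = p
--     ind = 0
--     for i, ch in enumerate(a):
--         if ch == 'Y':
--             p -= 1
--         else:
--             p += 1
--         if p < min_p:
--             min_p = p
--             ind = i + 1
--     return ind
-- ===== SOURCE B (Python) =====
-- def compute(a: str) -> int:
--     totY = sum(1 for ch in a if ch == 'Y')
--     # penalty table: pen[k] = (#'non-Y' in a[:k]) + (#'Y' in a[k:]) = totY + 2*prefN_k - k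
--     pen = [totY]
--     prefN = 0
--     for k, ch in enumerate(a, 1):
--         if ch != 'Y':
--             prefN += 1
--         pen.append(totY + 2 * prefN - k)
--     # earliest argmin of the table
--     best_k, best_v = 0, totY
--     for k, v in enumerate(pen):
--         if v < best_v:
--             best_k, best_v = k, v
--     return best_k
-- ===== Notes on version B (the rewrite author's own statement) =====
-- stated objective: alternative
-- what changed: B materializes the penalty at every split point as an explicit table computed from the total Y count and a running prefix count of non-Y characters (pen[k] = totY + 2*prefN_k - k), then selects the earliest argmin in a separate scan, instead of A's fused running-balance loop that updates the minimum in place.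
import Mathlib
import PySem

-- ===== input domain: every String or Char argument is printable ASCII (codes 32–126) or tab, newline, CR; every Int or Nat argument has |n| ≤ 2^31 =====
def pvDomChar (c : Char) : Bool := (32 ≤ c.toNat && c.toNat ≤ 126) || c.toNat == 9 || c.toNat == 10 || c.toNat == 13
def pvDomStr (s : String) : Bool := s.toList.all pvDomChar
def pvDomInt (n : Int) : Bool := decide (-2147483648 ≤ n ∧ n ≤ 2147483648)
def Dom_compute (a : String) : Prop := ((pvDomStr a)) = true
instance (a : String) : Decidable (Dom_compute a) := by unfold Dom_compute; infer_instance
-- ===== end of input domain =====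

-- B builds an explicit penalty table from counts and then scans it for the earliest argmin,
-- instead of A's fused running-balance loop (objective: alternative decomposition, same cost).

-- ===== PORT A =====
def compute (a : String) : Int :=
  let p0 : Int := a.toList.foldl (fun acc ch => if ch = 'Y' then acc + 1 else acc) 0
  let st := (PySem.List.enumerate a.toList 0).foldl
    (fun (s : Int × Int × Int) (ic : Int × Char) =>
      let p := if ic.2 = 'Y' then s.1 - 1 else s.1 + 1
      if p < s.2.1 then (p, p, ic.1 + 1) else (p, s.2.1, s.2.2))
    (p0, p0, 0)
  st.2.2

-- ===== PORT B =====
def compute_alt (a : String) : Int :=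
  let totY : Int := a.toList.foldl (fun acc ch => if ch = 'Y' then acc + 1 else acc) 0
  let built := (PySem.List.enumerate a.toList 1).foldl
    (fun (s : Int × List Int) (kc : Int × Char) =>
      let prefN := if kc.2 ≠ 'Y' then s.1 + 1 else s.1
      (prefN, s.2 ++ [totY + 2 * prefN - kc.1]))
    (0, [totY])
  let pen := built.2
  let best := (PySem.List.enumerate pen 0).foldl
    (fun (b : Int × Int) (kv : Int × Int) =>
      if kv.2 < b.2 then (kv.1, kv.2) else b)
    (0, totY)
  best.1

-- ===== PRECONDITION & SPEC =====
def Spec_compute (a : String) (out : Int) : Prop := out = compute_alt a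
instance (a : String) (out : Int) : Decidable (Spec_compute a out) := by unfold Spec_compute; infer_instance

-- ===== CLAIM (what is proved, stated in full; the proofs are below) =====
def Claim_equal_compute : Prop := ∀ (a : String), Dom_compute a → Spec_compute a (compute a)

-- ===== LEMMAS AND PROOFS =====

-- the sequence of running penalties: pens l p = [step c1 p, step c2 (step c1 p), …]
def pvStep (c : Char) (p : Int) : Int := if c = 'Y' then p - 1 else p + 1

def pvPens : List Char → Int → List Int
  | [], _ => []
  | c :: cs, p => pvStep c p :: pvPens cs (pvStep c p)

-- earliest-argmin scan, state (index, value)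
def pvAmin : List Int → Int → Int × Int → Int × Int
  | [], _, b => b
  | v :: vs, k, b => pvAmin vs (k + 1) (if v < b.2 then (k, v) else b)

-- A's fused loop computes the argmin scan of the penalty sequence
theorem pvA_fold (l : List Char) : ∀ (i p mp ind : Int),
    ((PySem.List.enumerate l i).foldl
      (fun (s : Int × Int × Int) (ic : Int × Char) =>
        let q := if ic.2 = 'Y' then s.1 - 1 else s.1 + 1
        if q < s.2.1 then (q, q, ic.1 + 1) else (q, s.2.1, s.2.2))
      (p, mp, ind)).2.2
    = (pvAmin (pvPens l p) (i + 1) (ind, mp)).1 := by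
  induction l with
  | nil => intro i p mp ind; simp [PySem.List.enumerate_nil, pvPens, pvAmin]
  | cons c cs ih =>
    intro i p mp ind
    rw [PySem.List.enumerate_cons]
    simp only [List.foldl_cons, pvPens, pvAmin, pvStep]
    by_cases hc : c = 'Y' <;> by_cases hlt : (if c = 'Y' then p - 1 else p + 1) < mp <;>
      simp only [hc, if_true, if_false] at hlt ⊢ <;>
      simp only [hlt, if_true, if_false] <;> rw [ih]

-- B's table-building loop produces exactly the penalty sequence
theorem pvB_build (l : List Char) : ∀ (t k n0 : Int) (acc : List Int),
    ((PySem.List.enumerate l k).foldl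
      (fun (s : Int × List Int) (kc : Int × Char) =>
        let prefN := if kc.2 ≠ 'Y' then s.1 + 1 else s.1
        (prefN, s.2 ++ [t + 2 * prefN - kc.1]))
      (n0, acc)).2
    = acc ++ pvPens l (t + 2 * n0 - (k - 1)) := by
  induction l with
  | nil => intro t k n0 acc; simp [PySem.List.enumerate_nil, pvPens]
  | cons c cs ih =>
    intro t k n0 acc
    rw [PySem.List.enumerate_cons]
    simp only [List.foldl_cons]
    by_cases hc : c = 'Y'
    · simp only [hc, pvPens, pvStep, if_true, ne_eq, not_true_eq_false, if_false]
      rw [ih]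
      have h1 : t + 2 * n0 - k = t + 2 * n0 - (k - 1) - 1 := by ring
      have h2 : t + 2 * n0 - (k + 1 - 1) = t + 2 * n0 - (k - 1) - 1 := by ring
      rw [h1, h2, List.append_assoc]
      rfl
    · simp only [pvPens, pvStep, hc, ne_eq, not_false_eq_true, if_true, if_false]
      rw [ih]
      have h1 : t + 2 * (n0 + 1) - k = t + 2 * n0 - (k - 1) + 1 := by ring
      have h2 : t + 2 * (n0 + 1) - (k + 1 - 1) = t + 2 * n0 - (k - 1) + 1 := by ring
      rw [h1, h2, List.append_assoc]
      rfl

-- B's selection loop is the argmin scan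
theorem pvB_scan (xs : List Int) : ∀ (k : Int) (b : Int × Int),
    (PySem.List.enumerate xs k).foldl
      (fun (b : Int × Int) (kv : Int × Int) =>
        if kv.2 < b.2 then (kv.1, kv.2) else b) b
    = pvAmin xs k b := by
  induction xs with
  | nil => intro k b; simp [PySem.List.enumerate_nil, pvAmin]
  | cons v vs ih =>
    intro k b
    rw [PySem.List.enumerate_cons]
    simp only [List.foldl_cons, pvAmin]
    rw [ih]

-- ===== VERDICT (by name: the statement is the Claim_ definition above) =====
theorem compute_spec : Claim_equal_compute := by
  intro a _
  unfold Spec_compute compute compute_alt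
  simp only []
  set t : Int := a.toList.foldl (fun acc ch => if ch = 'Y' then acc + 1 else acc) 0 with ht
  rw [pvA_fold, pvB_build, pvB_scan]
  have h0 : t + 2 * 0 - (1 - 1) = t := by ring
  rw [h0]
  simp [pvAmin]
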